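-- pv_equiv track=rewrite | github.com/terrytompkins/hello-agent | file_agent/file_agent.py | _fix_common_syntax_issues
-- ===== SOURCE A (Python) =====
-- def _fix_common_syntax_issues(expression: str) -> str:
--     """Fix common syntax issues in generated expressions."""
--     # Remove trailing commas in function calls
--     expression = expression.replace(',)', ')')
--
--     # Fix common mismatched parentheses by counting and balancing
--     open_parens = expression.count('(')
--     close_parens = expression.count(')')
--     if open_parens > close_parens:
--         expression += ')' * (open_parens - close_parens)
--     elif close_parens > open_parens:
--         # Remove extra closing parentheses from the end
--         while expression.endswith(')') and close_parens > open_parens: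
--             expression = expression[:-1]
--             close_parens -= 1
--
--     return expression
-- ===== SOURCE B (Python) =====
-- def _fix_common_syntax_issues(expression: str) -> str:
--     """Fix common syntax issues in generated expressions."""
--     expression = expression.replace(',)', ')')
--     open_parens = expression.count('(')
--     close_parens = expression.count(')')
--     if open_parens > close_parens:
--         return expression + ')' * (open_parens - close_parens)
--     if close_parens > open_parens:
--         diff = close_parens - open_parens
--         run = len(expression) - len(expression.rstrip(')'))
--         remove = min(diff, run)
--         return expression[:len(expression) - remove]
--     return expression
-- ===== Notes on version B (the rewrite author's own statement) =====
-- stated objective: simpler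
-- what changed: The unbalanced-close case's character-by-character while-loop is replaced by a closed-form computation: remove = min(extra close parens, length of the trailing ')' run via rstrip), applied with a single slice.
import Mathlib
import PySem

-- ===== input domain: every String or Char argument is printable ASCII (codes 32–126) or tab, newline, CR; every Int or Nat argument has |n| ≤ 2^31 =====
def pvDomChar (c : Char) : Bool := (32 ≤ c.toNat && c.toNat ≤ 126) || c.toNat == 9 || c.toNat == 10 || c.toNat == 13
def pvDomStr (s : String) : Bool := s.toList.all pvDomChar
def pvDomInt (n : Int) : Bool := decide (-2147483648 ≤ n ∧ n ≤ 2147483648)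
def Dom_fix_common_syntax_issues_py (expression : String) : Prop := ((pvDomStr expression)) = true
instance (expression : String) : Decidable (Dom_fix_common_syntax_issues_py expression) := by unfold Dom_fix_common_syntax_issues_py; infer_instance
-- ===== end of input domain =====

-- B replaces A's char-by-char trimming loop with a closed-form slice: remove
-- min(extra closers, trailing-')' run) characters in one cut (objective: simpler).

-- ===== PORT A =====
-- the while-loop of A: while expression.endswith(')') and close_parens > open_parens:
--     expression = expression[:-1]; close_parens -= 1
def pyTrimA (e : List Char) (closeP openP : Nat) : List Char :=
  if h : PySem.Chars.endswith e [')'] = true ∧ openP < closeP then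
    pyTrimA (PySem.Chars.slice e none (some (-1))) (closeP - 1) openP
  else e
termination_by closeP
decreasing_by omega

def fix_common_syntax_issues_py (expression : String) : String :=
  let e := PySem.Chars.replace expression.toList [',', ')'] [')']
  let openP := PySem.Chars.count e ['(']
  let closeP := PySem.Chars.count e [')']
  if openP > closeP then
    -- expression += ')' * (open_parens - close_parens); the count is a Nat here
    String.ofList (e ++ List.replicate (openP - closeP) ')')
  else if closeP > openP then
    String.ofList (pyTrimA e closeP openP)
  else
    String.ofList e

-- ===== PORT B =====
-- exact hand port of str.rstrip(')') : drop the maximal trailing run of ')'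
def rstripParens (e : List Char) : List Char :=
  (e.reverse.dropWhile (fun c => c == ')')).reverse

def fix_common_syntax_issues_py_alt (expression : String) : String :=
  let e := PySem.Chars.replace expression.toList [',', ')'] [')']
  let openP := PySem.Chars.count e ['(']
  let closeP := PySem.Chars.count e [')']
  if openP > closeP then
    String.ofList (e ++ List.replicate (openP - closeP) ')')
  else if closeP > openP then
    let diff := closeP - openP
    let run := e.length - (rstripParens e).length
    let remove := min diff run
    -- expression[:len(expression) - remove], a nonnegative bound
    String.ofList (PySem.Chars.slice e none (some ((e.length - remove : Nat) : Int)))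
  else
    String.ofList e

-- ===== PRECONDITION & SPEC =====
def Spec_fix_common_syntax_issues_py (expression : String) (out : String) : Prop := out = fix_common_syntax_issues_py_alt expression
instance (expression : String) (out : String) : Decidable (Spec_fix_common_syntax_issues_py expression out) := by unfold Spec_fix_common_syntax_issues_py; infer_instance

-- ===== CLAIM (what is proved, stated in full; the proofs are below) =====
def Claim_equal_fix_common_syntax_issues_py : Prop := ∀ (expression : String), Dom_fix_common_syntax_issues_py expression → Spec_fix_common_syntax_issues_py expression (fix_common_syntax_issues_py expression)

-- ===== LEMMAS AND PROOFS =====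

-- length of the maximal trailing run of ')'
def runP (e : List Char) : Nat := (e.reverse.takeWhile (fun c => c == ')')).length

theorem rstripParens_len (e : List Char) :
    e.length - (rstripParens e).length = runP e := by
  unfold rstripParens runP
  have h := List.takeWhile_append_dropWhile (p := fun c => c == ')') (l := e.reverse)
  have hlen := congrArg List.length h
  rw [List.length_append, List.length_reverse] at hlen
  simp only [List.length_reverse]
  omega

theorem runP_append_rparen (e : List Char) : runP (e ++ [')']) = runP e + 1 := by
  unfold runP
  simp

theorem runP_zero_of_not_endswith (e : List Char)
    (h : ¬ PySem.Chars.endswith e [')'] = true) : runP e = 0 := by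
  unfold runP
  cases he : e.reverse with
  | nil => simp
  | cons c t =>
    have hc : ¬ c = ')' := by
      intro hcq
      apply h
      have : [')'] <:+ e := by
        refine ⟨t.reverse, ?_⟩
        have := congrArg List.reverse he
        simpa [hcq] using this.symm
      simpa [PySem.Chars.endswith, List.isSuffixOf_iff_suffix] using this
    simp [hc]

theorem endswith_iff (e : List Char) :
    PySem.Chars.endswith e [')'] = true ↔ ∃ e', e = e' ++ [')'] := by
  simp only [PySem.Chars.endswith, List.isSuffixOf_iff_suffix]
  constructor
  · rintro ⟨t, rfl⟩; exact ⟨t, rfl⟩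
  · rintro ⟨t, rfl⟩; exact ⟨t, rfl⟩

theorem pyTrimA_eq_take (closeP : Nat) :
    ∀ (e : List Char) (openP : Nat),
    pyTrimA e closeP openP = e.take (e.length - min (closeP - openP) (runP e)) := by
  induction closeP with
  | zero =>
    intro e openP
    rw [pyTrimA]
    simp
  | succ c ih =>
    intro e openP
    rw [pyTrimA]
    by_cases h : PySem.Chars.endswith e [')'] = true ∧ openP < c + 1
    · simp only [h, and_true, dif_pos]
      obtain ⟨e', rfl⟩ := (endswith_iff e).mp h.1
      rw [PySem.Chars.slice_eq_listSlice, PySem.List.slice_to_neg_one]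
      simp only [Nat.add_sub_cancel]
      simp only [List.dropLast_concat]
      rw [ih e' openP]
      have hrun : runP (e' ++ [')']) = runP e' + 1 := runP_append_rparen e'
      have hmin : min (c + 1 - openP) (runP (e' ++ [')']))
          = min (c - openP) (runP e') + 1 := by
        rw [hrun]; omega
      rw [hmin]
      have hlen2 : (e' ++ [')']).length = e'.length + 1 := by simp
      rw [hlen2]
      have harith : e'.length + 1 - (min (c - openP) (runP e') + 1)
          = e'.length - min (c - openP) (runP e') := by omega
      rw [harith, List.take_append_of_le_length (by omega)]
    · simp only [dif_neg h]
      rcases Classical.em (PySem.Chars.endswith e [')'] = true) with hew | hew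
      · have : ¬ openP < c + 1 := fun hc => h ⟨hew, hc⟩
        have : c + 1 - openP = 0 := by omega
        simp [this]
      · rw [runP_zero_of_not_endswith e hew]
        simp

-- ===== VERDICT (by name: the statement is the Claim_ definition above) =====
theorem fix_common_syntax_issues_py_spec : Claim_equal_fix_common_syntax_issues_py := by
  intro expression _
  unfold Spec_fix_common_syntax_issues_py
  simp only [fix_common_syntax_issues_py, fix_common_syntax_issues_py_alt]
  split_ifs with h1 h2
  · rfl
  · rw [pyTrimA_eq_take, PySem.Chars.slice_eq_listSlice, PySem.List.slice_to_natCast,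
      rstripParens_len]
  · rfl
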